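-- pv_equiv track=rewrite | github.com/sunzhennian/eopyBlog | modules/eopyBlog/eopyBlogUtil.py | AddAddtionalInfos
-- ===== SOURCE A (Python) =====
-- def AddAddtionalInfos(postListSorted):
--     for file_idx in range(0, len(postListSorted)):
--         if file_idx == 0 and len(postListSorted)>1:
--             postListSorted[file_idx]['NEXT_POST'] = postListSorted[file_idx + 1]['HTML_URL']
--         elif file_idx == len(postListSorted) - 1 and len(postListSorted)>1:
--             postListSorted[file_idx]['PREVIOUS_POST'] = postListSorted[file_idx - 1]['HTML_URL']
--         elif len(postListSorted)>1:
--             postListSorted[file_idx]['PREVIOUS_POST'] = postListSorted[file_idx - 1]['HTML_URL']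
--             postListSorted[file_idx]['NEXT_POST'] = postListSorted[file_idx + 1]['HTML_URL']
--     return postListSorted
-- ===== SOURCE B (Python) =====
-- def AddAddtionalInfos(postListSorted):
--     if len(postListSorted) <= 1:
--         return postListSorted
--     # snapshot the URL table once, then two staged field-filling passes
--     urls = [p['HTML_URL'] for p in postListSorted]
--     for p, u in zip(postListSorted[1:], urls):
--         p['PREVIOUS_POST'] = u
--     for p, u in zip(postListSorted, urls[1:]):
--         p['NEXT_POST'] = u
--     return postListSorted
-- ===== Notes on version B (the rewrite author's own statement) =====
-- stated objective: alternative
-- what changed: Instead of one indexed loop with first/last/middle branch analysis, B snapshots all HTML_URLs into a table once and then fills the fields in two staged passes: one pass writes every PREVIOUS_POST from the table, a second pass writes every NEXT_POST.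
import Mathlib
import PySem

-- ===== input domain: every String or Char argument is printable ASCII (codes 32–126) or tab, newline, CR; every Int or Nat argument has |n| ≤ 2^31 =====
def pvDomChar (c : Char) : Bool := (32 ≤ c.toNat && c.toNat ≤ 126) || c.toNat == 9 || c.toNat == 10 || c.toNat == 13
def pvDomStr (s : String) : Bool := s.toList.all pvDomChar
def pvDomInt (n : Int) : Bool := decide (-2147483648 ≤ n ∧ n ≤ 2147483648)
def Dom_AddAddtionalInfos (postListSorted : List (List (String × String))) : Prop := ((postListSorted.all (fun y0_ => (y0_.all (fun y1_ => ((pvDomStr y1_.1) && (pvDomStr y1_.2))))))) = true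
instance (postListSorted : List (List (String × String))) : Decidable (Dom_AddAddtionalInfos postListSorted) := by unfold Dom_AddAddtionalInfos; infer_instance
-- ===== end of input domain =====

-- B snapshots the HTML_URL table once and fills the links in two staged passes (all
-- PREVIOUS_POST, then all NEXT_POST) instead of A's indexed loop with first/last/middle
-- branches; both Pythons mutate the given dicts in place and return the same list object —
-- the theorems here are about the returned value.

-- Python dict operations on an association list (dict as List (String × String), insertion order):
-- d[k] = v  (overwrite in place / append)
def pvIns (d : List (String × String)) (k v : String) : List (String × String) :=
  ((PySem.Dict.mk d).insert k v).items
-- d['HTML_URL']; KeyError (= missing key) is excluded by Pre_, where the "" default is unreachable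
def pvHtml (d : List (String × String)) : String :=
  (PySem.Dict.mk d).getD "HTML_URL" ""

-- ===== PORT A =====
-- loop body of A's 'for file_idx in range(0, len(postListSorted))'
def pvStepA (acc : List (List (String × String))) (i : Int) : List (List (String × String)) :=
  if i = 0 ∧ 1 < acc.length then
    PySem.List.pySetD acc i
      (pvIns (PySem.List.pyGetD acc i []) "NEXT_POST" (pvHtml (PySem.List.pyGetD acc (i + 1) [])))
  else if i = (acc.length : Int) - 1 ∧ 1 < acc.length then
    PySem.List.pySetD acc i
      (pvIns (PySem.List.pyGetD acc i []) "PREVIOUS_POST" (pvHtml (PySem.List.pyGetD acc (i - 1) [])))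
  else if 1 < acc.length then
    let acc1 := PySem.List.pySetD acc i
      (pvIns (PySem.List.pyGetD acc i []) "PREVIOUS_POST" (pvHtml (PySem.List.pyGetD acc (i - 1) [])))
    PySem.List.pySetD acc1 i
      (pvIns (PySem.List.pyGetD acc1 i []) "NEXT_POST" (pvHtml (PySem.List.pyGetD acc1 (i + 1) [])))
  else acc

def AddAddtionalInfos (postListSorted : List (List (String × String))) : List (List (String × String)) :=
  (PySem.List.pyRange 0 (postListSorted.length : Int)).foldl pvStepA postListSorted

-- ===== PORT B =====
-- 'for p, u in zip(ps, us): p[key] = u' — elements past the shorter list are untouched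
def pvZipSet (key : String) : List (List (String × String)) → List String →
    List (List (String × String))
  | ps, [] => ps
  | [], _ :: _ => []
  | p :: ps, u :: us => pvIns p key u :: pvZipSet key ps us

def AddAddtionalInfos_alt (postListSorted : List (List (String × String))) : List (List (String × String)) :=
  if postListSorted.length ≤ 1 then postListSorted
  else
    -- urls = [p['HTML_URL'] for p in postListSorted]
    let urls := postListSorted.map pvHtml
    -- for p, u in zip(postListSorted[1:], urls): p['PREVIOUS_POST'] = u
    let ys := match postListSorted with
      | [] => []
      | h :: t => h :: pvZipSet "PREVIOUS_POST" t urls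
    -- for p, u in zip(postListSorted, urls[1:]): p['NEXT_POST'] = u
    pvZipSet "NEXT_POST" ys (urls.drop 1)

-- ===== PRECONDITION & SPEC =====
-- Pre_ excludes exactly the inputs where Python raises KeyError: with at least two posts,
-- every post's 'HTML_URL' is read, so every dict must carry that key.
def Pre_AddAddtionalInfos (postListSorted : List (List (String × String))) : Prop :=
  postListSorted.length ≤ 1 ∨
    ∀ d ∈ postListSorted, (PySem.Dict.mk d).contains "HTML_URL" = true
instance (postListSorted : List (List (String × String))) : Decidable (Pre_AddAddtionalInfos postListSorted) := by unfold Pre_AddAddtionalInfos; infer_instance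

def pvWitness_AddAddtionalInfos : (List (List (String × String))) :=
  [[("HTML_URL", "/p/1.html")], [("HTML_URL", "/p/2.html"), ("TITLE", "t")], [("HTML_URL", "/p/3.html")]]

def Spec_AddAddtionalInfos (postListSorted : List (List (String × String))) (out : List (List (String × String))) : Prop := out = AddAddtionalInfos_alt postListSorted
instance (postListSorted : List (List (String × String))) (out : List (List (String × String))) : Decidable (Spec_AddAddtionalInfos postListSorted out) := by unfold Spec_AddAddtionalInfos; infer_instance

-- ===== CLAIM (what is proved, stated in full; the proofs are below) =====
def Claim_equal_AddAddtionalInfos : Prop := ∀ (postListSorted : List (List (String × String))), Dom_AddAddtionalInfos postListSorted → Pre_AddAddtionalInfos postListSorted → Spec_AddAddtionalInfos postListSorted (AddAddtionalInfos postListSorted)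

-- ===== LEMMAS AND PROOFS =====

-- the value both programs leave at position j (reading neighbours' HTML_URL from the original list)
def pvOut (xs : List (List (String × String))) (j : Nat) : List (String × String) :=
  if xs.length ≤ 1 then xs.getD j []
  else if j = 0 then pvIns (xs.getD 0 []) "NEXT_POST" (pvHtml (xs.getD 1 []))
  else if j = xs.length - 1 then
    pvIns (xs.getD j []) "PREVIOUS_POST" (pvHtml (xs.getD (j - 1) []))
  else
    pvIns (pvIns (xs.getD j []) "PREVIOUS_POST" (pvHtml (xs.getD (j - 1) [])))
      "NEXT_POST" (pvHtml (xs.getD (j + 1) []))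

lemma pvHtml_pvIns (d : List (String × String)) (k v : String) (hk : k ≠ "HTML_URL") :
    pvHtml (pvIns d k v) = pvHtml d := by
  show ((PySem.Dict.mk d).insert k v).getD "HTML_URL" "" = _
  exact PySem.Dict.getD_insert_of_ne _ _ _ (Ne.symm hk)

lemma length_pvZipSet (key : String) (ps : List (List (String × String))) (us : List String) :
    (pvZipSet key ps us).length = ps.length := by
  induction ps generalizing us with
  | nil => cases us <;> simp [pvZipSet]
  | cons p ps ih => cases us <;> simp [pvZipSet, ih]

lemma getD_pvZipSet (key : String) (ps : List (List (String × String))) (us : List String)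
    (j : Nat) :
    (pvZipSet key ps us).getD j [] =
      if j < us.length ∧ j < ps.length then pvIns (ps.getD j []) key (us.getD j "")
      else ps.getD j [] := by
  induction ps generalizing us j with
  | nil =>
      cases us with
      | nil => simp [pvZipSet]
      | cons u us => simp [pvZipSet, List.getD]
  | cons p ps ih =>
      cases us with
      | nil => simp [pvZipSet]
      | cons u us =>
          cases j with
          | zero => simp [pvZipSet, List.getD]
          | succ j =>
              simp only [pvZipSet, List.getD_cons_succ, ih, List.length_cons]
              rw [if_congr (show (j < us.length ∧ j < ps.length) ↔
                    (j + 1 < us.length + 1 ∧ j + 1 < ps.length + 1) from by omega) rfl rfl]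

lemma getD_map_pvHtml (xs : List (List (String × String))) (j : Nat) (hj : j < xs.length) :
    (xs.map pvHtml).getD j "" = pvHtml (xs.getD j []) := by
  rw [List.getD_eq_getElem _ _ (by simpa using hj), List.getD_eq_getElem _ _ hj]
  simp

lemma pvAlt_eq (xs : List (List (String × String))) :
    AddAddtionalInfos_alt xs = (List.range xs.length).map (pvOut xs) := by
  by_cases h1 : xs.length ≤ 1
  · unfold AddAddtionalInfos_alt
    rw [if_pos h1]
    rcases xs with _ | ⟨a, _ | ⟨b, t⟩⟩
    · simp
    · simp [pvOut, List.getD]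
    · simp at h1
  · unfold AddAddtionalInfos_alt
    rw [if_neg h1]
    rcases xs with _ | ⟨h, t⟩
    · simp at h1
    · have hn : 1 < (h :: t).length := by omega
      show pvZipSet "NEXT_POST" (h :: pvZipSet "PREVIOUS_POST" t (List.map pvHtml (h :: t)))
          (List.drop 1 (List.map pvHtml (h :: t))) = _
      apply List.ext_getElem
      · simp [length_pvZipSet]
      · intro j hL hR
        have hj : j < (h :: t).length := by
          simpa [length_pvZipSet] using hL
        rw [← List.getD_eq_getElem _ ([] : List (String × String)) hL,
            ← List.getD_eq_getElem _ ([] : List (String × String)) hR]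
        rw [List.getD_eq_getElem _ _ hR, List.getElem_map, List.getElem_range]
        rw [getD_pvZipSet]
        have hys : ∀ i : Nat, i < (h :: t).length →
            ((h :: pvZipSet "PREVIOUS_POST" t (List.map pvHtml (h :: t))).getD i []) =
              (if i = 0 then h
               else pvIns ((h :: t).getD i []) "PREVIOUS_POST"
                 (pvHtml ((h :: t).getD (i - 1) []))) := by
          intro i hi
          cases i with
          | zero => simp [List.getD]
          | succ i =>
              simp only [List.getD_cons_succ, Nat.succ_ne_zero, if_false]
              rw [getD_pvZipSet]
              have hit : i < (List.map pvHtml (h :: t)).length ∧ i < t.length := by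
                simp at hi ⊢; omega
              rw [if_pos hit, getD_map_pvHtml _ _ (by simp at hi ⊢; omega)]
              simp
        have hlen : ((h :: t).map pvHtml).length = (h :: t).length := by simp
        by_cases hlast : j = t.length
        · have hnot : ¬ (j < (((h :: t).map pvHtml).drop 1).length ∧
              j < (h :: pvZipSet "PREVIOUS_POST" t (List.map pvHtml (h :: t))).length) := by
            simp [length_pvZipSet]; omega
          rw [if_neg hnot, hys j hj]
          have hj0 : j ≠ 0 := by simp at hn; omega
          rw [if_neg hj0]
          unfold pvOut
          rw [if_neg h1, if_neg hj0,
            if_pos (show j = (h :: t).length - 1 from by simp [hlast])]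
        · have hyes : j < (((h :: t).map pvHtml).drop 1).length ∧
              j < (h :: pvZipSet "PREVIOUS_POST" t (List.map pvHtml (h :: t))).length := by
            simp [length_pvZipSet] at hj ⊢; omega
          rw [if_pos hyes, hys j hj]
          have hdrop : ((((h :: t).map pvHtml).drop 1).getD j "") =
              pvHtml ((h :: t).getD (j + 1) []) := by
            rw [List.getD_eq_getElem _ _ hyes.1, List.getElem_drop,
                ← List.getD_eq_getElem _ ("" : String) (by simp at hj ⊢; omega)]
            rw [show 1 + j = j + 1 from by omega]
            exact getD_map_pvHtml _ _ (by simp at hj ⊢; omega)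
          rw [hdrop]
          by_cases hj0 : j = 0
          · subst hj0
            unfold pvOut
            rw [if_neg h1, if_pos rfl]
            simp [List.getD]
          · rw [if_neg hj0]
            unfold pvOut
            rw [if_neg h1, if_neg hj0,
              if_neg (show ¬ j = (h :: t).length - 1 from by simp; omega)]

-- ---- A-side: fold over range leaves pvOut at every position ----

def pvPartial (xs : List (List (String × String))) (k : Nat) : List (List (String × String)) :=
  (List.range xs.length).map (fun j => if j < k then pvOut xs j else xs.getD j [])

lemma length_pvPartial (xs : List (List (String × String))) (k : Nat) :
    (pvPartial xs k).length = xs.length := by simp [pvPartial]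

lemma getD_pvPartial (xs : List (List (String × String))) (k j : Nat) (hj : j < xs.length) :
    (pvPartial xs k).getD j [] = if j < k then pvOut xs j else xs.getD j [] := by
  simp [pvPartial, List.getD_eq_getElem?_getD, hj]

lemma set_map_range {α : Type} (f : Nat → α) (n k : Nat) (v : α) :
    ((List.range n).map f).set k v = (List.range n).map (fun j => if j = k then v else f j) := by
  apply List.ext_getElem
  · simp
  · intro i h1 h2
    simp only [List.getElem_set, List.getElem_map, List.getElem_range]
    rcases eq_or_ne k i with h | h
    · simp [h]
    · simp [h, Ne.symm h]

lemma pvPartial_zero (xs : List (List (String × String))) : pvPartial xs 0 = xs := by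
  apply List.ext_getElem
  · simp [pvPartial]
  · intro i h1 h2
    simp only [pvPartial, List.getElem_map, List.getElem_range, Nat.not_lt_zero, if_false]
    exact List.getD_eq_getElem _ _ (by simpa [pvPartial] using h1)

lemma getD_set_self {α : Type} (l : List α) (k : Nat) (v d : α) (h : k < l.length) :
    (l.set k v).getD k d = v := by
  rw [List.getD_eq_getElem _ _ (by simpa using h)]
  simp [List.getElem_set_self]

lemma getD_set_ne {α : Type} (l : List α) (k m : Nat) (v d : α) (h : m < l.length) (hne : k ≠ m) :
    (l.set k v).getD m d = l.getD m d := by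
  rw [List.getD_eq_getElem _ _ (by simpa using h), List.getD_eq_getElem _ _ h]
  rw [List.getElem_set_ne hne]

lemma pvHtml_pvOut (xs : List (List (String × String))) (j : Nat) :
    pvHtml (pvOut xs j) = pvHtml (xs.getD j []) := by
  unfold pvOut
  split_ifs <;>
    simp_all [pvHtml_pvIns _ _ _ (by decide : ("NEXT_POST":String) ≠ "HTML_URL"),
      pvHtml_pvIns _ _ _ (by decide : ("PREVIOUS_POST":String) ≠ "HTML_URL")]

lemma pvStepA_pvPartial (xs : List (List (String × String))) (k : Nat) (hk : k < xs.length) :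
    pvStepA (pvPartial xs k) (k : Int) = pvPartial xs (k + 1) := by
  have hL : (pvPartial xs k).length = xs.length := length_pvPartial xs k
  by_cases h1 : xs.length ≤ 1
  · have hn : xs.length = 1 := by omega
    have hk0 : k = 0 := by omega
    subst hk0
    unfold pvStepA
    rw [hL, hn]
    norm_num
    apply List.map_congr_left
    intro j hj
    rw [hn] at hj
    have hj0 : j = 0 := by simpa using hj
    subst hj0
    simp [pvOut, hn]
  · have h2 : 1 < xs.length := by omega
    by_cases hk0 : k = 0
    · subst hk0
      unfold pvStepA
      rw [hL]
      rw [if_pos (by exact ⟨by norm_num, h2⟩)]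
      have e1 : ((0:Nat):Int) + 1 = ((1:Nat):Int) := by norm_num
      rw [e1]
      simp only [PySem.List.pyGetD_natCast, PySem.List.pySetD_natCast]
      rw [getD_pvPartial xs 0 0 (by omega), getD_pvPartial xs 0 1 (by omega)]
      simp only [Nat.not_lt_zero, if_false]
      unfold pvPartial
      rw [set_map_range]
      apply List.map_congr_left
      intro j hj
      have hjn : j < xs.length := by simpa using hj
      by_cases hj0 : j = 0
      · subst hj0
        simp [pvOut, h1]
      · simp only [if_neg hj0, if_neg (by omega : ¬ j < 0), if_neg (by omega : ¬ j < 0 + 1)]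
    · have hk1 : 1 ≤ k := by omega
      have hc1 : ¬ (((k:Nat):Int) = 0 ∧ 1 < xs.length) := by omega
      have e1 : ((k:Nat):Int) - 1 = (((k-1):Nat):Int) := by omega
      by_cases hklast : k = xs.length - 1
      · have hc2 : ((k:Nat):Int) = (xs.length:Int) - 1 := by omega
        unfold pvStepA
        rw [hL]
        rw [if_neg hc1, if_pos ⟨hc2, h2⟩, e1]
        simp only [PySem.List.pyGetD_natCast, PySem.List.pySetD_natCast]
        rw [getD_pvPartial xs k k (by omega), getD_pvPartial xs k (k-1) (by omega)]
        rw [if_neg (lt_irrefl k), if_pos (by omega : k - 1 < k), pvHtml_pvOut]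
        unfold pvPartial
        rw [set_map_range]
        apply List.map_congr_left
        intro j hj
        have hjn : j < xs.length := by simpa using hj
        by_cases hjk : j = k
        · subst hjk
          simp only [if_pos (by omega : j < j + 1)]
          unfold pvOut
          rw [if_neg h1, if_neg hk0, if_pos hklast]
          simp
        · simp only [if_neg hjk, show (j < k + 1) = (j < k) from by
            simp only [eq_iff_iff]; omega]
      · have hc2 : ¬ (((k:Nat):Int) = (xs.length:Int) - 1 ∧ 1 < xs.length) := by omega
        have e2 : ((k:Nat):Int) + 1 = (((k+1):Nat):Int) := by omega
        unfold pvStepA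
        rw [hL]
        rw [if_neg hc1, if_neg hc2, if_pos h2, e1, e2]
        simp only [PySem.List.pyGetD_natCast, PySem.List.pySetD_natCast]
        rw [getD_set_self _ _ _ _ (by rw [length_pvPartial]; omega),
            getD_set_ne _ _ _ _ _ (by rw [length_pvPartial]; omega) (by omega),
            List.set_set]
        rw [getD_pvPartial xs k k (by omega), getD_pvPartial xs k (k-1) (by omega),
            getD_pvPartial xs k (k+1) (by omega)]
        rw [if_neg (lt_irrefl k), if_pos (by omega : k - 1 < k),
            if_neg (by omega : ¬ k + 1 < k), pvHtml_pvOut]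
        unfold pvPartial
        rw [set_map_range]
        apply List.map_congr_left
        intro j hj
        have hjn : j < xs.length := by simpa using hj
        by_cases hjk : j = k
        · subst hjk
          simp only [if_pos (by omega : j < j + 1)]
          unfold pvOut
          rw [if_neg h1, if_neg hk0, if_neg (by omega : ¬ j = xs.length - 1)]
          simp
        · simp only [if_neg hjk, show (j < k + 1) = (j < k) from by
            simp only [eq_iff_iff]; omega]

lemma pvFoldA (xs : List (List (String × String))) :
    ∀ (d k : Nat), k + d = xs.length →
      List.foldl (fun acc (j : Nat) => pvStepA acc (j : Int)) (pvPartial xs k) (List.range' k d) =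
        pvPartial xs xs.length := by
  intro d
  induction d with
  | zero =>
      intro k hk
      rw [List.range'_zero, List.foldl_nil, show k = xs.length from by omega]
  | succ d ih =>
      intro k hk
      rw [List.range'_succ, List.foldl_cons,
        show pvStepA (pvPartial xs k) (k : Int) = pvPartial xs (k + 1) from
          pvStepA_pvPartial xs k (by omega)]
      exact ih (k + 1) (by omega)

lemma pvFoldA_eq (xs : List (List (String × String))) :
    List.foldl (fun acc (j : Nat) => pvStepA acc (j : Int)) xs (List.range xs.length) =
      (List.range xs.length).map (pvOut xs) := by
  have h0 : xs = pvPartial xs 0 := (pvPartial_zero xs).symm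
  conv_lhs => rw [h0]
  rw [length_pvPartial, List.range_eq_range']
  have h := pvFoldA xs xs.length 0 (by omega)
  rw [h, ← List.range_eq_range']
  unfold pvPartial
  apply List.map_congr_left
  intro j hj
  rw [if_pos (by simpa using hj)]

-- ===== VERDICT =====
theorem AddAddtionalInfos_spec : Claim_equal_AddAddtionalInfos := by
  intro xs _ _
  show AddAddtionalInfos xs = AddAddtionalInfos_alt xs
  unfold AddAddtionalInfos
  rw [PySem.List.pyRange_zero_natCast, List.foldl_map, pvFoldA_eq, pvAlt_eq]
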